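-- pv_equiv track=rewrite | github.com/nananaiz/hangman | rpn.py | make_rpn_formula
-- ===== SOURCE A (Python) =====
-- def make_rpn_formula(num_tuple, num_used = 0, opr_used = 0, formula = []):
--     num_tuple = tuple(str(num_tuple[i]) for i in range(len(num_tuple)))
--     # 逆ポーランド記法の式が完成（＝formulaの長さが数値の個数＋演算子の個数になる）したらformulaは完成
--     # なお演算子の個数は数値の個数-1
--     if len(formula) == len (num_tuple) * 2 - 1:
--         return [' '.join(formula)]
--     else:
--         rpn_list = []
--         # opr_usedはnum_used以上の個数になることはできない
--         if num_used <= opr_used + 1: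
--             rpn_list.extend(make_rpn_formula(num_tuple, num_used + 1, opr_used, formula + [num_tuple[num_used]]))
--         else:
--             # formulaには数値、演算子のいずれかを追加する
--             if num_used < len(num_tuple):
--                 rpn_list.extend(make_rpn_formula(num_tuple, num_used + 1, opr_used, formula + [num_tuple[num_used]]))
--             rpn_list.extend(make_rpn_formula(num_tuple, num_used, opr_used + 1, formula + ['+']))
--             rpn_list.extend(make_rpn_formula(num_tuple, num_used, opr_used + 1, formula + ['-']))
--             rpn_list.extend(make_rpn_formula(num_tuple, num_used, opr_used + 1, formula + ['*']))
--             rpn_list.extend(make_rpn_formula(num_tuple, num_used, opr_used + 1, formula + ['/']))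
--     return rpn_list
-- ===== SOURCE B (Python) =====
-- def make_rpn_formula(num_tuple, num_used = 0, opr_used = 0, formula = []):
--     # level-synchronous breadth-first enumeration: every state at the same depth,
--     # so expanding whole levels in order reproduces A's DFS output order
--     strs = [str(x) for x in num_tuple]
--     n = len(strs)
--     target = 2 * n - 1
--     if len(formula) == target:
--         return [' '.join(formula)]
--     states = [(num_used, opr_used, list(formula))]
--     for _ in range(target - len(formula)):
--         nxt = []
--         for u, o, f in states:
--             if u <= o + 1:
--                 nxt.append((u + 1, o, f + [strs[u]]))
--             else:
--                 if u < n: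
--                     nxt.append((u + 1, o, f + [strs[u]]))
--                 for op in '+-*/':
--                     nxt.append((u, o + 1, f + [op]))
--         states = nxt
--     return [' '.join(f) for _, _, f in states]
-- ===== Notes on version B (the rewrite author's own statement) =====
-- stated objective: alternative
-- what changed: A's depth-first recursion (recursing on each child and concatenating) is replaced by a level-synchronous breadth-first expansion: a list of states is expanded whole level by level for exactly 2n-1-len(formula) rounds, and the final level is joined; since every state of a level has the same formula length, this visits leaves in A's exact DFS order.
import Mathlib
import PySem

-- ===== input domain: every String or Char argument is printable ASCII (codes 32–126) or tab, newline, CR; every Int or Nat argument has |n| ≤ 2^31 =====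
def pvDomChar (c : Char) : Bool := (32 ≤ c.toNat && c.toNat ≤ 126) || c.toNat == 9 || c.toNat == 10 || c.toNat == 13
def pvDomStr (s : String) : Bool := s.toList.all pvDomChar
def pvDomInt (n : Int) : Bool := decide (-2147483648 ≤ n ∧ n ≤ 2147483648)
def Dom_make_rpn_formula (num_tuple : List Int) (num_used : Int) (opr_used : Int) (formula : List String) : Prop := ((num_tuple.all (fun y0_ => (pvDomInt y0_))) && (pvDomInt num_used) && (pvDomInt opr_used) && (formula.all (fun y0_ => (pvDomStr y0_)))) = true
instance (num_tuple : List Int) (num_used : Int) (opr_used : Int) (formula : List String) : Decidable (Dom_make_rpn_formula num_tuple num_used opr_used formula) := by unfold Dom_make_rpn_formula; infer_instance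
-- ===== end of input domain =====

-- B replaces A's depth-first recursion by a level-synchronous breadth-first expansion of a
-- state list (all states share one depth, so the final level is A's DFS output order); same
-- return value on every input where Python A returns (objective: alternative decomposition).

-- ===== PORT A =====
-- num_tuple[num_used]: Python indexing (negative wraps); .getD "" is reached only where
-- Python raises IndexError, which Pre_ excludes.
def pvTokA (nums : List String) (i : Int) : String := (PySem.List.pyGet? nums i).getD ""

-- literal transliteration of A's recursion; `fuel` only makes the recursion total in Lean:
-- on Pre_ inputs Python's recursion depth is 2*n-1-|formula| < fuel, so fuel never runs out.
def rpnA (nums : List String) : Nat → Int → Int → List String → List String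
  | 0, _, _, _ => []
  | fuel+1, num_used, opr_used, formula =>
    if (formula.length : Int) = (nums.length : Int) * 2 - 1 then
      [PySem.Str.join " " formula]
    else
      if num_used ≤ opr_used + 1 then
        rpnA nums fuel (num_used+1) opr_used (formula ++ [pvTokA nums num_used])
      else
        (if num_used < (nums.length : Int) then
           rpnA nums fuel (num_used+1) opr_used (formula ++ [pvTokA nums num_used])
         else [])
        ++ rpnA nums fuel num_used (opr_used+1) (formula ++ ["+"])
        ++ rpnA nums fuel num_used (opr_used+1) (formula ++ ["-"])
        ++ rpnA nums fuel num_used (opr_used+1) (formula ++ ["*"])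
        ++ rpnA nums fuel num_used (opr_used+1) (formula ++ ["/"])

def make_rpn_formula (num_tuple : List Int) (num_used : Int) (opr_used : Int) (formula : List String) : List String :=
  rpnA (num_tuple.map PySem.Int.toStr) (num_tuple.length * 2 + 1) num_used opr_used formula

-- ===== PORT B =====
-- children of one state, in A's left-to-right order (number, '+', '-', '*', '/')
def rpnChildren (nums : List String) (s : Int × Int × List String) : List (Int × Int × List String) :=
  match s with
  | (u, o, f) =>
    if u ≤ o + 1 then [(u+1, o, f ++ [pvTokA nums u])]
    else
      (if u < (nums.length : Int) then [(u+1, o, f ++ [pvTokA nums u])] else [])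
      ++ [(u, o+1, f ++ ["+"]), (u, o+1, f ++ ["-"]), (u, o+1, f ++ ["*"]), (u, o+1, f ++ ["/"])]

-- the `for _ in range(...)` loop of Source B: expand the whole level, d times
def rpnLevels (nums : List String) : Nat → List (Int × Int × List String) → List (Int × Int × List String)
  | 0, states => states
  | d+1, states => rpnLevels nums d (states.flatMap (rpnChildren nums))

def make_rpn_formula_alt (num_tuple : List Int) (num_used : Int) (opr_used : Int) (formula : List String) : List String :=
  let strs := num_tuple.map PySem.Int.toStr
  let target : Int := 2 * (strs.length : Int) - 1
  if (formula.length : Int) = target then [PySem.Str.join " " formula]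
  else
    (rpnLevels strs (target - (formula.length : Int)).toNat [(num_used, opr_used, formula)]).map
      (fun s => PySem.Str.join " " s.2.2)

-- ===== PRECONDITION & SPEC =====
-- Exactly the inputs on which Python A returns normally: either the formula is already complete,
-- or every search path reaches the complete length before a forced number-placement would index
-- past the tuple (elsewhere A raises IndexError, including always when num_tuple is empty).
def Pre_make_rpn_formula (num_tuple : List Int) (num_used : Int) (opr_used : Int) (formula : List String) : Prop :=
  let n : Int := num_tuple.length
  let L : Int := formula.length
  let T : Int := 2 * n - 1
  L = T ∨ (L < T ∧ -n ≤ num_used ∧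
    ((num_used ≤ n ∧ T ≤ L + (n - num_used) + max 0 (n - 1 - opr_used)) ∨
     (n < num_used ∧ T ≤ L + max 0 (num_used - 1 - opr_used))))
instance (num_tuple : List Int) (num_used : Int) (opr_used : Int) (formula : List String) : Decidable (Pre_make_rpn_formula num_tuple num_used opr_used formula) := by unfold Pre_make_rpn_formula; infer_instance

def pvWitness_make_rpn_formula : List Int × Int × Int × List String := ([1, 2], 0, 0, [])

def Spec_make_rpn_formula (num_tuple : List Int) (num_used : Int) (opr_used : Int) (formula : List String) (out : List String) : Prop := out = make_rpn_formula_alt num_tuple num_used opr_used formula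
instance (num_tuple : List Int) (num_used : Int) (opr_used : Int) (formula : List String) (out : List String) : Decidable (Spec_make_rpn_formula num_tuple num_used opr_used formula out) := by unfold Spec_make_rpn_formula; infer_instance

-- ===== CLAIM (what is proved, stated in full; the proofs are below) =====
def Claim_equal_make_rpn_formula : Prop := ∀ (num_tuple : List Int) (num_used : Int) (opr_used : Int) (formula : List String), Dom_make_rpn_formula num_tuple num_used opr_used formula → Pre_make_rpn_formula num_tuple num_used opr_used formula → Spec_make_rpn_formula num_tuple num_used opr_used formula (make_rpn_formula num_tuple num_used opr_used formula)

-- ===== LEMMAS AND PROOFS =====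

lemma rpnLevels_nil (nums : List String) : ∀ (d : Nat), rpnLevels nums d ([] : List (Int × Int × List String)) = []
  | 0 => rfl
  | d+1 => by simpa [rpnLevels] using rpnLevels_nil nums d

lemma rpnLevels_append (nums : List String) :
    ∀ (d : Nat) (S S' : List (Int × Int × List String)),
      rpnLevels nums d (S ++ S') = rpnLevels nums d S ++ rpnLevels nums d S' := by
  intro d
  induction d with
  | zero => intro S S'; rfl
  | succ d ih =>
      intro S S'
      simp [rpnLevels, List.flatMap_append, ih]

lemma rpn_level_eq (nums : List String) :
    ∀ (d fuel : Nat) (u o : Int) (f : List String),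
      (f.length : Int) + d = 2 * (nums.length : Int) - 1 → d < fuel →
      rpnA nums fuel u o f
        = (rpnLevels nums d [(u, o, f)]).map (fun s => PySem.Str.join " " s.2.2) := by
  intro d
  induction d with
  | zero =>
      intro fuel u o f hlen hfuel
      obtain ⟨fuel', rfl⟩ : ∃ k, fuel = k + 1 := ⟨fuel - 1, by omega⟩
      have h1 : (f.length : Int) = (nums.length : Int) * 2 - 1 := by push_cast at hlen; omega
      rw [rpnA, if_pos h1]
      simp [rpnLevels]
  | succ d ih =>
      intro fuel u o f hlen hfuel
      obtain ⟨fuel', rfl⟩ : ∃ k, fuel = k + 1 := ⟨fuel - 1, by omega⟩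
      have hne : ¬ ((f.length : Int) = (nums.length : Int) * 2 - 1) := by omega
      have hstep : rpnLevels nums (d+1) [(u, o, f)]
          = rpnLevels nums d (rpnChildren nums (u, o, f)) := by
        simp [rpnLevels, List.flatMap]
      rw [rpnA, if_neg hne, hstep]
      by_cases hforced : u ≤ o + 1
      · rw [if_pos hforced]
        rw [show rpnChildren nums (u, o, f) = [(u+1, o, f ++ [pvTokA nums u])] from by
          simp [rpnChildren, if_pos hforced]]
        exact ih fuel' (u+1) o _ (by simp only [List.length_append, List.length_singleton, Nat.cast_add, Nat.cast_one]; push_cast at hlen; omega) (by omega)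
      · rw [if_neg hforced]
        rw [show rpnChildren nums (u, o, f)
            = (if u < (nums.length : Int) then [(u+1, o, f ++ [pvTokA nums u])] else [])
              ++ ([(u, o+1, f ++ ["+"])] ++ ([(u, o+1, f ++ ["-"])] ++ ([(u, o+1, f ++ ["*"])] ++ [(u, o+1, f ++ ["/"])]))) from by
          simp [rpnChildren, if_neg hforced]]
        rw [rpnLevels_append, rpnLevels_append, rpnLevels_append, rpnLevels_append]
        simp only [List.map_append]
        have hnum : (if u < (nums.length : Int) then rpnA nums fuel' (u+1) o (f ++ [pvTokA nums u]) else [])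
            = (rpnLevels nums d (if u < (nums.length : Int) then [(u+1, o, f ++ [pvTokA nums u])] else [])).map (fun s => PySem.Str.join " " s.2.2) := by
          by_cases hlt : u < (nums.length : Int)
          · rw [if_pos hlt, if_pos hlt]
            exact ih fuel' (u+1) o _ (by simp; omega) (by omega)
          · rw [if_neg hlt, if_neg hlt]
            simp [rpnLevels_nil]
        rw [hnum, ih fuel' u (o+1) (f ++ ["+"]) (by simp only [List.length_append, List.length_singleton, Nat.cast_add, Nat.cast_one]; push_cast at hlen; omega) (by omega),
            ih fuel' u (o+1) (f ++ ["-"]) (by simp only [List.length_append, List.length_singleton, Nat.cast_add, Nat.cast_one]; push_cast at hlen; omega) (by omega),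
            ih fuel' u (o+1) (f ++ ["*"]) (by simp only [List.length_append, List.length_singleton, Nat.cast_add, Nat.cast_one]; push_cast at hlen; omega) (by omega),
            ih fuel' u (o+1) (f ++ ["/"]) (by simp only [List.length_append, List.length_singleton, Nat.cast_add, Nat.cast_one]; push_cast at hlen; omega) (by omega)]
        simp [List.append_assoc]

-- ===== VERDICT (by name: the statement is the Claim_ definition above) =====
theorem make_rpn_formula_spec : Claim_equal_make_rpn_formula := by
  intro num_tuple num_used opr_used formula _ hpre
  unfold Spec_make_rpn_formula make_rpn_formula make_rpn_formula_alt
  have hn : ((num_tuple.map PySem.Int.toStr).length : Int) = (num_tuple.length : Int) := by simp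
  rcases hpre with hEq | ⟨hlt, -⟩
  · -- formula already complete: both return the joined formula
    have hA : (formula.length : Int) = ((num_tuple.map PySem.Int.toStr).length : Int) * 2 - 1 := by
      rw [hn]; omega
    have hB : (formula.length : Int) = 2 * ((num_tuple.map PySem.Int.toStr).length : Int) - 1 := by
      rw [hn]; omega
    rw [rpnA, if_pos hA, if_pos hB]
  · -- incomplete: relate A's recursion at depth d to B's d expansion levels
    have hne : ¬ ((formula.length : Int) = 2 * ((num_tuple.map PySem.Int.toStr).length : Int) - 1) := by
      rw [hn]; omega
    rw [if_neg hne]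
    have hd : (formula.length : Int) + ((2 * ((num_tuple.map PySem.Int.toStr).length : Int) - 1 - (formula.length : Int)).toNat : Int)
        = 2 * ((num_tuple.map PySem.Int.toStr).length : Int) - 1 := by
      rw [hn]; omega
    exact rpn_level_eq (num_tuple.map PySem.Int.toStr)
      ((2 * ((num_tuple.map PySem.Int.toStr).length : Int) - 1 - (formula.length : Int)).toNat)
      (num_tuple.length * 2 + 1) num_used opr_used formula hd (by rw [hn] at hd ⊢; omega)
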